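-- pv_equiv track=rewrite | github.com/IEEE-UCF/SEC26Mirror | scripts/deploy-orchestrator.py | _classify_changed_files
-- ===== SOURCE A (Python) =====
-- def _classify_changed_files(files: list[str]) -> tuple[bool, bool, bool]:
--     """Classify a list of changed file paths.
--
--     Returns (mcu_changed, ros_changed, microros_rebuild).
--     microros_rebuild is True when changes require a micro-ROS clean rebuild:
--       - mcu_msgs definitions (ros2_ws/src/mcu_msgs/)
--       - micro_ros_platformio submodules (mcu_ws/libs_external/)
--       - PlatformIO build config (mcu_ws/platformio.ini)
--       - extra_packages (mcu_ws/extra_packages/)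
--     This matches the CI cache key in platformio-robot.yml.
--     """
--     mcu = any(f.startswith("mcu_ws/") for f in files)
--     ros = any(f.startswith("ros2_ws/")
--               or f.startswith("Dockerfile")
--               or f.startswith("docker-compose")
--               for f in files)
--
--     microros_rebuild = any(
--         f.startswith("ros2_ws/src/mcu_msgs/")
--         or f.startswith("mcu_ws/libs_external/")
--         or f.startswith("mcu_ws/extra_packages/")
--         or f == "mcu_ws/platformio.ini"
--         or f == "mcu_ws/custom_microros.meta"
--         for f in files
--     )
--
--     if microros_rebuild:
--         mcu = True  # micro-ROS changes require MCU firmware rebuild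
--
--     return mcu, ros, microros_rebuild
-- ===== SOURCE B (Python) =====
-- # Table-driven classifier: one ordered rule table (most specific first) maps each
-- # file to its own flag triple; the answer is the componentwise OR over files.
-- _RULES = [
--     ("mcu_ws/platformio.ini", True, (True, False, True)),
--     ("mcu_ws/custom_microros.meta", True, (True, False, True)),
--     ("ros2_ws/src/mcu_msgs/", False, (True, True, True)),
--     ("mcu_ws/libs_external/", False, (True, False, True)),
--     ("mcu_ws/extra_packages/", False, (True, False, True)),
--     ("mcu_ws/", False, (True, False, False)),
--     ("ros2_ws/", False, (False, True, False)),
--     ("Dockerfile", False, (False, True, False)),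
--     ("docker-compose", False, (False, True, False)),
-- ]
--
--
-- def _file_flags(f):
--     for pat, exact, flags in _RULES:
--         if (f == pat) if exact else f.startswith(pat):
--             return flags
--     return (False, False, False)
--
--
-- def _classify_changed_files(files: list[str]) -> tuple[bool, bool, bool]:
--     mcu = ros = micro = False
--     for f in files:
--         a, b, c = _file_flags(f)
--         mcu = mcu or a
--         ros = ros or b
--         micro = micro or c
--     return (mcu, ros, micro)
-- ===== Notes on version B (the rewrite author's own statement) =====
-- stated objective: alternative
-- what changed: Replaces the three hard-coded any(...) scans (plus a post-hoc mcu fix-up) with a data-driven first-match rule table: each file is classified once into its own (mcu,ros,micro) triple (the micro-implies-mcu rule baked into the table entries) and the result is the componentwise OR of those triples.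
import Mathlib
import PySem

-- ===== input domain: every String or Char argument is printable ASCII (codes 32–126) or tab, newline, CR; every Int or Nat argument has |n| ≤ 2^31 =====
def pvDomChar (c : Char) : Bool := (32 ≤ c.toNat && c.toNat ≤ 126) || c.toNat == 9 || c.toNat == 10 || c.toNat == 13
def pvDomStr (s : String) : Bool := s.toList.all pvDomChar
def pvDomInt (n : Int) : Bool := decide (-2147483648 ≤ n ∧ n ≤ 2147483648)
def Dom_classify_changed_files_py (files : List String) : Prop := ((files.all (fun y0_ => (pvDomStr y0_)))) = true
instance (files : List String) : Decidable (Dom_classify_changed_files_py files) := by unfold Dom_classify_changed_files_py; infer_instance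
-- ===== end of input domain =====

-- One honest line: B replaces A's three any(...) scans plus mcu fix-up with a
-- first-match rule table classifying each file into its own flag triple, OR-reduced.

-- ===== PORT A =====
def classify_changed_files_py (files : List String) : Bool × Bool × Bool :=
  let mcu := files.any (fun f => PySem.Str.startswith f "mcu_ws/")
  let ros := files.any (fun f =>
    PySem.Str.startswith f "ros2_ws/" || PySem.Str.startswith f "Dockerfile"
      || PySem.Str.startswith f "docker-compose")
  let microros_rebuild := files.any (fun f =>
    PySem.Str.startswith f "ros2_ws/src/mcu_msgs/"
      || PySem.Str.startswith f "mcu_ws/libs_external/"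
      || PySem.Str.startswith f "mcu_ws/extra_packages/"
      || f == "mcu_ws/platformio.ini"
      || f == "mcu_ws/custom_microros.meta")
  let mcu := if microros_rebuild then true else mcu
  (mcu, ros, microros_rebuild)

-- ===== PORT B =====
-- the ordered rule table: (pattern, is-exact-match, flag triple), most specific first
def pvRules : List (String × Bool × (Bool × Bool × Bool)) :=
  [ ("mcu_ws/platformio.ini", true, (true, false, true))
  , ("mcu_ws/custom_microros.meta", true, (true, false, true))
  , ("ros2_ws/src/mcu_msgs/", false, (true, true, true))
  , ("mcu_ws/libs_external/", false, (true, false, true))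
  , ("mcu_ws/extra_packages/", false, (true, false, true))
  , ("mcu_ws/", false, (true, false, false))
  , ("ros2_ws/", false, (false, true, false))
  , ("Dockerfile", false, (false, true, false))
  , ("docker-compose", false, (false, true, false)) ]

def pvFileFlags (f : String) : Bool × Bool × Bool :=
  match pvRules.find? (fun r => if r.2.1 then f == r.1 else PySem.Str.startswith f r.1) with
  | some r => r.2.2
  | none => (false, false, false)

def classify_changed_files_py_alt (files : List String) : Bool × Bool × Bool :=
  files.foldl (fun (s : Bool × Bool × Bool) f =>
    let fl := pvFileFlags f
    (s.1 || fl.1, s.2.1 || fl.2.1, s.2.2 || fl.2.2)) (false, false, false)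

-- ===== PRECONDITION & SPEC =====
def Spec_classify_changed_files_py (files : List String) (out : Bool × Bool × Bool) : Prop := out = classify_changed_files_py_alt files
instance (files : List String) (out : Bool × Bool × Bool) : Decidable (Spec_classify_changed_files_py files out) := by unfold Spec_classify_changed_files_py; infer_instance

-- ===== CLAIM (what is proved, stated in full; the proofs are below) =====
def Claim_equal_classify_changed_files_py : Prop := ∀ (files : List String), Dom_classify_changed_files_py files → Spec_classify_changed_files_py files (classify_changed_files_py files)

-- ===== LEMMAS AND PROOFS =====

-- prefixes of a common list are comparable
theorem pv_prefix_total {p q l : List Char} (h1 : p <+: l) (h2 : q <+: l) :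
    p <+: q ∨ q <+: p := by
  obtain ⟨t1, rfl⟩ := h1
  rcases List.prefix_or_prefix_of_prefix (List.prefix_append p t1) h2 with h | h
  · exact Or.inl h
  · exact Or.inr h

theorem pv_st_iff {f p : String} :
    PySem.Str.startswith f p = true ↔ p.toList <+: f.toList := by
  simp [PySem.Str.startswith_eq, PySem.Chars.startswith_iff]

theorem pv_st_false {f p : String} (h : ¬ p.toList <+: f.toList) :
    PySem.Str.startswith f p = false := by
  rw [← Bool.not_eq_true, pv_st_iff]; exact h

theorem pv_st_trans {f p q : String} (h : PySem.Str.startswith f p = true)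
    (hpq : q.toList <+: p.toList) : PySem.Str.startswith f q = true := by
  rw [pv_st_iff] at h ⊢; exact hpq.trans h

theorem pv_st_excl {f p q : String} (h : PySem.Str.startswith f p = true)
    (h1 : ¬ p.toList <+: q.toList) (h2 : ¬ q.toList <+: p.toList) :
    PySem.Str.startswith f q = false := by
  rw [pv_st_iff] at h
  rw [← Bool.not_eq_true, pv_st_iff]
  intro hq
  rcases pv_prefix_total h hq with hh | hh
  · exact h1 hh
  · exact h2 hh

-- per-file correctness of the rule table against A's three predicates
theorem pv_fileFlags_eq (f : String) :
    pvFileFlags f =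
      ((PySem.Str.startswith f "mcu_ws/"
          || (PySem.Str.startswith f "ros2_ws/src/mcu_msgs/"
              || PySem.Str.startswith f "mcu_ws/libs_external/"
              || PySem.Str.startswith f "mcu_ws/extra_packages/"
              || f == "mcu_ws/platformio.ini"
              || f == "mcu_ws/custom_microros.meta")),
        (PySem.Str.startswith f "ros2_ws/" || PySem.Str.startswith f "Dockerfile"
          || PySem.Str.startswith f "docker-compose"),
        (PySem.Str.startswith f "ros2_ws/src/mcu_msgs/"
          || PySem.Str.startswith f "mcu_ws/libs_external/"
          || PySem.Str.startswith f "mcu_ws/extra_packages/"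
          || f == "mcu_ws/platformio.ini"
          || f == "mcu_ws/custom_microros.meta")) := by
  unfold pvFileFlags pvRules
  by_cases hE1 : f = "mcu_ws/platformio.ini"
  · have b1 : (f == "mcu_ws/platformio.ini") = true := by simp [hE1]
    have b2 : (f == "mcu_ws/custom_microros.meta") = false := by rw [hE1]; decide
    have s3 : PySem.Str.startswith f "ros2_ws/src/mcu_msgs/" = false := pv_st_false (by rw [hE1]; decide)
    have s4 : PySem.Str.startswith f "mcu_ws/libs_external/" = false := pv_st_false (by rw [hE1]; decide)
    have s5 : PySem.Str.startswith f "mcu_ws/extra_packages/" = false := pv_st_false (by rw [hE1]; decide)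
    have s6 : PySem.Str.startswith f "mcu_ws/" = true := pv_st_iff.mpr (by rw [hE1]; decide)
    have s7 : PySem.Str.startswith f "ros2_ws/" = false := pv_st_false (by rw [hE1]; decide)
    have s8 : PySem.Str.startswith f "Dockerfile" = false := pv_st_false (by rw [hE1]; decide)
    have s9 : PySem.Str.startswith f "docker-compose" = false := pv_st_false (by rw [hE1]; decide)
    simp only [List.find?, b1, b2, s3, s4, s5, s6, s7, s8, s9, eq_self_iff_true, if_true, if_false, Bool.false_eq_true,
      Bool.true_or, Bool.false_or, Bool.or_false, Bool.or_true]
  by_cases hE2 : f = "mcu_ws/custom_microros.meta"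
  · have b1 : (f == "mcu_ws/platformio.ini") = false := by simpa using hE1
    have b2 : (f == "mcu_ws/custom_microros.meta") = true := by simp [hE2]
    have s3 : PySem.Str.startswith f "ros2_ws/src/mcu_msgs/" = false := pv_st_false (by rw [hE2]; decide)
    have s4 : PySem.Str.startswith f "mcu_ws/libs_external/" = false := pv_st_false (by rw [hE2]; decide)
    have s5 : PySem.Str.startswith f "mcu_ws/extra_packages/" = false := pv_st_false (by rw [hE2]; decide)
    have s6 : PySem.Str.startswith f "mcu_ws/" = true := pv_st_iff.mpr (by rw [hE2]; decide)
    have s7 : PySem.Str.startswith f "ros2_ws/" = false := pv_st_false (by rw [hE2]; decide)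
    have s8 : PySem.Str.startswith f "Dockerfile" = false := pv_st_false (by rw [hE2]; decide)
    have s9 : PySem.Str.startswith f "docker-compose" = false := pv_st_false (by rw [hE2]; decide)
    simp only [List.find?, b1, b2, s3, s4, s5, s6, s7, s8, s9, eq_self_iff_true, if_true, if_false, Bool.false_eq_true,
      Bool.true_or, Bool.false_or, Bool.or_false, Bool.or_true]
  have b1 : (f == "mcu_ws/platformio.ini") = false := by simpa using hE1
  have b2 : (f == "mcu_ws/custom_microros.meta") = false := by simpa using hE2
  cases s3 : PySem.Str.startswith f "ros2_ws/src/mcu_msgs/" with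
  | true =>
    have s7 : PySem.Str.startswith f "ros2_ws/" = true := pv_st_trans s3 (by decide)
    have s6 : PySem.Str.startswith f "mcu_ws/" = false := pv_st_excl s7 (by decide) (by decide)
    simp only [List.find?, b1, b2, s3, s6, s7, eq_self_iff_true, if_true, if_false, Bool.false_eq_true,
      Bool.true_or, Bool.false_or, Bool.or_false, Bool.or_true]
  | false =>
  cases s4 : PySem.Str.startswith f "mcu_ws/libs_external/" with
  | true =>
    have s6 : PySem.Str.startswith f "mcu_ws/" = true := pv_st_trans s4 (by decide)
    have s7 : PySem.Str.startswith f "ros2_ws/" = false := pv_st_excl s6 (by decide) (by decide)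
    have s8 : PySem.Str.startswith f "Dockerfile" = false := pv_st_excl s6 (by decide) (by decide)
    have s9 : PySem.Str.startswith f "docker-compose" = false := pv_st_excl s6 (by decide) (by decide)
    simp only [List.find?, b1, b2, s3, s4, s6, s7, s8, s9, eq_self_iff_true, if_true, if_false, Bool.false_eq_true,
      Bool.true_or, Bool.false_or, Bool.or_false, Bool.or_true]
  | false =>
  cases s5 : PySem.Str.startswith f "mcu_ws/extra_packages/" with
  | true =>
    have s6 : PySem.Str.startswith f "mcu_ws/" = true := pv_st_trans s5 (by decide)
    have s7 : PySem.Str.startswith f "ros2_ws/" = false := pv_st_excl s6 (by decide) (by decide)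
    have s8 : PySem.Str.startswith f "Dockerfile" = false := pv_st_excl s6 (by decide) (by decide)
    have s9 : PySem.Str.startswith f "docker-compose" = false := pv_st_excl s6 (by decide) (by decide)
    simp only [List.find?, b1, b2, s3, s4, s5, s6, s7, s8, s9, eq_self_iff_true, if_true, if_false, Bool.false_eq_true,
      Bool.true_or, Bool.false_or, Bool.or_false, Bool.or_true]
  | false =>
  cases s6 : PySem.Str.startswith f "mcu_ws/" with
  | true =>
    have s7 : PySem.Str.startswith f "ros2_ws/" = false := pv_st_excl s6 (by decide) (by decide)
    have s8 : PySem.Str.startswith f "Dockerfile" = false := pv_st_excl s6 (by decide) (by decide)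
    have s9 : PySem.Str.startswith f "docker-compose" = false := pv_st_excl s6 (by decide) (by decide)
    simp only [List.find?, b1, b2, s3, s4, s5, s6, s7, s8, s9, eq_self_iff_true, if_true, if_false, Bool.false_eq_true,
      Bool.true_or, Bool.false_or, Bool.or_false, Bool.or_true]
  | false =>
  cases s7 : PySem.Str.startswith f "ros2_ws/" with
  | true =>
    simp only [List.find?, b1, b2, s3, s4, s5, s6, s7, eq_self_iff_true, if_true, if_false, Bool.false_eq_true,
      Bool.true_or, Bool.false_or, Bool.or_false, Bool.or_true]
  | false =>
  cases s8 : PySem.Str.startswith f "Dockerfile" with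
  | true =>
    simp only [List.find?, b1, b2, s3, s4, s5, s6, s7, s8, eq_self_iff_true, if_true, if_false, Bool.false_eq_true,
      Bool.true_or, Bool.false_or, Bool.or_false, Bool.or_true]
  | false =>
  cases s9 : PySem.Str.startswith f "docker-compose" with
  | true =>
    simp only [List.find?, b1, b2, s3, s4, s5, s6, s7, s8, s9, eq_self_iff_true, if_true, if_false, Bool.false_eq_true,
      Bool.true_or, Bool.false_or, Bool.or_false, Bool.or_true]
  | false =>
    simp only [List.find?, b1, b2, s3, s4, s5, s6, s7, s8, s9, eq_self_iff_true, if_true, if_false, Bool.false_eq_true,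
      Bool.true_or, Bool.false_or, Bool.or_false, Bool.or_true]

-- the OR-fold computes the componentwise any of the per-file triples
theorem pv_foldl_or (g : String → Bool × Bool × Bool) (files : List String) (m r u : Bool) :
    files.foldl (fun (s : Bool × Bool × Bool) f =>
      let fl := g f
      (s.1 || fl.1, s.2.1 || fl.2.1, s.2.2 || fl.2.2)) (m, r, u) =
    (m || files.any (fun f => (g f).1),
     r || files.any (fun f => (g f).2.1),
     u || files.any (fun f => (g f).2.2)) := by
  induction files generalizing m r u with
  | nil => simp
  | cons f fs ih => simp [List.foldl_cons, List.any_cons, ih, Bool.or_assoc]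

theorem pv_any_or {a : Type} (p q : a -> Bool) (l : List a) :
    l.any (fun x => p x || q x) = (l.any p || l.any q) := by
  induction l with
  | nil => simp
  | cons x xs ih => simp [List.any_cons, ih, Bool.or_assoc, Bool.or_left_comm]

theorem classify_changed_files_py_spec : Claim_equal_classify_changed_files_py := by
  intro files _
  unfold Spec_classify_changed_files_py classify_changed_files_py classify_changed_files_py_alt
  rw [pv_foldl_or]
  simp only [pv_fileFlags_eq, Bool.false_or, pv_any_or]
  split <;> simp_all
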